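-- pv_equiv track=rewrite | github.com/LahiruHW/portfolio | DYNAMIC PROGRAMMING PRACTICE/SPOJ (Sphere Online Judge)/COINS - Bytelandian gold coins/coins_bgc_1 (list memo).py | aux
-- ===== SOURCE A (Python) =====
-- def aux(memo, i):
--     if memo[i] != -1:
--         return memo[i]
--     else:
--         temp1 = i//2 + i//3 + i//4
--         temp2 = aux(memo, i//2) + aux(memo, i//3) + aux(memo, i//4)
--         memo[i] = max(temp1, temp2, i)
--         return memo[i]
-- ===== SOURCE B (Python) =====
-- def aux(memo, i):
--     # Bottom-up DP table fill instead of memoized top-down recursion.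
--     # Return value only: does not mutate memo (works on a copy).
--     if memo[i] != -1:
--         return memo[i]
--     vals = list(memo)
--     for s in range(i + 1):
--         if vals[s] == -1:
--             vals[s] = max(s//2 + s//3 + s//4,
--                           vals[s//2] + vals[s//3] + vals[s//4],
--                           s)
--     return vals[i]
-- ===== Notes on version B (the rewrite author's own statement) =====
-- stated objective: alternative
-- what changed: Replaces the memoized top-down recursion (which mutates memo) with an iterative bottom-up DP that fills a copied table for states 0..i in ascending order and reads off entry i.
-- outside the precondition, e.g. on aux([0, -1, 5], -2): A returns 15, B returns -1
import Mathlib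
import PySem

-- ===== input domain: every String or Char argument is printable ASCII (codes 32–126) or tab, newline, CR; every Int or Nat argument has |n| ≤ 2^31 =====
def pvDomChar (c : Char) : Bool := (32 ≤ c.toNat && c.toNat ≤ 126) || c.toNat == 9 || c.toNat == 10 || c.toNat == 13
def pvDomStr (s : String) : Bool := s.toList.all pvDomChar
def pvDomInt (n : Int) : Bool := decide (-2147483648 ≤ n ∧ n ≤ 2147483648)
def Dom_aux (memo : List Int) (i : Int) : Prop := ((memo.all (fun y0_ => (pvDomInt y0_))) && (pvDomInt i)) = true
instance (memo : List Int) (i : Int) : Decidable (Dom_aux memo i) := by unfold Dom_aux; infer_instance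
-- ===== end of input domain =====

-- B is an iterative bottom-up DP table fill (on a copy of memo) instead of A's memoized
-- top-down recursion; A mutates memo in place and B does not, so the equivalence proved
-- here is about the RETURN value only.

-- ===== PORT A =====
-- A's recursion does not terminate on all inputs (it self-calls forever on an unset state 0),
-- so the port threads the mutated memo and uses fuel i.toNat + 2, enough for every input in Pre_.
def auxFuel : Nat → List Int → Int → (Int × List Int)
  | 0, m, _ => (0, m)                     -- fuel exhausted: Python raises; unreachable inside Pre_
  | Nat.succ f, m, i =>
    let mi := PySem.List.pyGetD m i 0     -- memo[i] (IndexError = out of range, excluded by Pre_)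
    if mi ≠ -1 then (mi, m)
    else
      let temp1 := PySem.Int.floordiv i 2 + PySem.Int.floordiv i 3 + PySem.Int.floordiv i 4
      let p2 := auxFuel f m (PySem.Int.floordiv i 2)
      let p3 := auxFuel f p2.2 (PySem.Int.floordiv i 3)
      let p4 := auxFuel f p3.2 (PySem.Int.floordiv i 4)
      let temp2 := p2.1 + p3.1 + p4.1
      let v := max (max temp1 temp2) i
      (v, PySem.List.pySetD p4.2 i v)     -- memo[i] = v

def aux (memo : List Int) (i : Int) : Int := (auxFuel (i.toNat + 2) memo i).1

-- ===== PORT B =====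
-- one step of the fill loop body: if vals[s] == -1: vals[s] = max(...)
def fillStep (vals : List Int) (s : Int) : List Int :=
  if PySem.List.pyGetD vals s 0 = -1 then
    PySem.List.pySetD vals s
      (max (max (PySem.Int.floordiv s 2 + PySem.Int.floordiv s 3 + PySem.Int.floordiv s 4)
                (PySem.List.pyGetD vals (PySem.Int.floordiv s 2) 0 +
                 PySem.List.pyGetD vals (PySem.Int.floordiv s 3) 0 +
                 PySem.List.pyGetD vals (PySem.Int.floordiv s 4) 0))
           s)
  else vals

def aux_alt (memo : List Int) (i : Int) : Int :=
  let mi := PySem.List.pyGetD memo i 0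
  if mi ≠ -1 then mi
  else
    -- vals = list(memo); for s in range(i+1): ...  (Lean lists are immutable: the copy is memo itself)
    let vals := (PySem.List.pyRange 0 (i + 1) 1).foldl fillStep memo
    PySem.List.pyGetD vals i 0

-- ===== PRECONDITION & SPEC =====
-- hitsZero memo s holds exactly when A's recursion from state s runs through unset (-1)
-- entries down to an unset state 0, i.e. exactly when Python A raises RecursionError there.
def hitsTable (memo : List Int) : Nat → List Bool
  | 0 => [memo.getD 0 0 == -1]
  | n+1 =>
    let t := hitsTable memo n
    t ++ [memo.getD (n+1) 0 == -1 &&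
          (t.getD ((n+1)/2) false || t.getD ((n+1)/3) false || t.getD ((n+1)/4) false)]

def hitsZero (memo : List Int) (n : Nat) : Bool := (hitsTable memo n).getD n false

-- Pre_ excludes exactly (a) out-of-range indices (IndexError) and in-range inputs whose
-- chain of unset (-1) entries from i reaches the self-referential unset base state 0
-- (RecursionError), on all of which A raises, and (b) negative in-range i with memo[i]
-- unset, Python index wraparound outside the problem's natural domain 0 <= i < len(memo),
-- where B's ascending table fill deliberately does not follow A — see the cited example.
def Pre_aux (memo : List Int) (i : Int) : Prop :=
  (0 ≤ i ∧ i < memo.length ∧ hitsZero memo i.toNat = false) ∨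
  (-(memo.length : Int) ≤ i ∧ i < 0 ∧ PySem.List.pyGetD memo i 0 ≠ -1)
instance (memo : List Int) (i : Int) : Decidable (Pre_aux memo i) := by unfold Pre_aux; infer_instance

def pvWitness_aux : List Int × Int := ([2, -1, -1], 2)

def Spec_aux (memo : List Int) (i : Int) (out : Int) : Prop := out = aux_alt memo i
instance (memo : List Int) (i : Int) (out : Int) : Decidable (Spec_aux memo i out) := by unfold Spec_aux; infer_instance

-- ===== CLAIM (what is proved, stated in full; the proofs are below) =====
def Claim_equal_aux : Prop := ∀ (memo : List Int) (i : Int), Dom_aux memo i → Pre_aux memo i → Spec_aux memo i (aux memo i)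

-- ===== LEMMAS AND PROOFS =====

theorem hitsTable_length (memo : List Int) (n : Nat) : (hitsTable memo n).length = n + 1 := by
  induction n with
  | zero => rfl
  | succ k ih => simp [hitsTable, ih]

theorem hitsTable_getD_le (memo : List Int) (n j : Nat) (hj : j ≤ n) :
    (hitsTable memo (n+1)).getD j false = (hitsTable memo n).getD j false := by
  simp only [hitsTable, List.getD]
  rw [List.getElem?_append_left (by rw [hitsTable_length]; omega)]

theorem hitsTable_getD_hitsZero (memo : List Int) :
    ∀ n j, j ≤ n → (hitsTable memo n).getD j false = hitsZero memo j := by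
  intro n
  induction n with
  | zero =>
    intro j hj
    obtain rfl : j = 0 := by omega
    rfl
  | succ k ih =>
    intro j hj
    by_cases h : j = k + 1
    · subst h; rfl
    · rw [hitsTable_getD_le memo k j (by omega), ih j (by omega)]

-- the recursive characterization of hitsZero used by the A-side proof
theorem hitsZero_zero (memo : List Int) : hitsZero memo 0 = (memo.getD 0 0 == -1) := rfl

theorem hitsZero_succ (memo : List Int) (n : Nat) :
    hitsZero memo (n+1) = (memo.getD (n+1) 0 == -1 &&
      (hitsZero memo ((n+1)/2) || hitsZero memo ((n+1)/3) || hitsZero memo ((n+1)/4))) := by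
  show (hitsTable memo n ++ [memo.getD (n+1) 0 == -1 &&
      ((hitsTable memo n).getD ((n+1)/2) false || (hitsTable memo n).getD ((n+1)/3) false ||
       (hitsTable memo n).getD ((n+1)/4) false)]).getD (n+1) false = _
  rw [hitsTable_getD_hitsZero memo n ((n+1)/2) (by omega),
      hitsTable_getD_hitsZero memo n ((n+1)/3) (by omega),
      hitsTable_getD_hitsZero memo n ((n+1)/4) (by omega)]
  rw [List.getD_append_right _ _ _ _ (by rw [hitsTable_length])]
  simp [hitsTable_length]

-- the pure value both programs compute for state n (= memo[n] if set; for the unset base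
-- state 0 the value 0, which is what B's formula yields there; under Pre_ the unset state 0
-- is never reached by A)
def pureVal (memo : List Int) : Nat → Int
  | 0 => if memo.getD 0 0 ≠ -1 then memo.getD 0 0 else 0
  | (n+1) =>
    if memo.getD (n+1) 0 ≠ -1 then memo.getD (n+1) 0
    else
      max (max ((((n+1)/2 : Nat) : Int) + (((n+1)/3 : Nat) : Int) + (((n+1)/4 : Nat) : Int))
               (pureVal memo ((n+1)/2) + pureVal memo ((n+1)/3) + pureVal memo ((n+1)/4)))
          ((n+1 : Nat) : Int)
  decreasing_by all_goals exact Nat.div_lt_self (Nat.succ_pos n) (by omega)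

theorem pureVal_of_set (memo : List Int) (n : Nat) (h : memo.getD n 0 ≠ -1) :
    pureVal memo n = memo.getD n 0 := by
  cases n <;> rw [pureVal, if_pos h]

-- invariant of A's threaded memo: each entry is still the original or the pure value of an
-- originally unset state
def InvA (memo m : List Int) : Prop :=
  m.length = memo.length ∧
  ∀ j : Nat, j < memo.length →
    m.getD j 0 = memo.getD j 0 ∨ (memo.getD j 0 = -1 ∧ m.getD j 0 = pureVal memo j)

theorem getD_set_eq_ite (xs : List Int) (n j : Nat) (v : Int) :
    (xs.set n v).getD j 0 = if j = n ∧ n < xs.length then v else xs.getD j 0 := by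
  simp only [List.getD, List.getElem?_set]
  by_cases hj : j = n
  · subst hj
    by_cases hl : j < xs.length
    · simp [hl]
    · simp [hl]
  · simp [hj, Ne.symm hj]

-- value of m[n] under the invariant, when it is set
theorem invA_getD_set (memo m : List Int) (hInv : InvA memo m) (n : Nat) (hn : n < memo.length)
    (hset : m.getD n 0 ≠ -1) : m.getD n 0 = pureVal memo n := by
  rcases hInv.2 n hn with h | ⟨h1, h2⟩
  · rw [h, pureVal_of_set memo n (h ▸ hset)]
  · exact h2

theorem invA_unset (memo m : List Int) (hInv : InvA memo m) (n : Nat) (hn : n < memo.length)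
    (hun : m.getD n 0 = -1) : memo.getD n 0 = -1 := by
  rcases hInv.2 n hn with h | ⟨h1, _⟩
  · rw [← h, hun]
  · exact h1

theorem auxFuel_correct (memo : List Int) :
    ∀ n : Nat, hitsZero memo n = false → ∀ m fuel, InvA memo m → n < memo.length → n + 1 ≤ fuel →
      (auxFuel fuel m (n : Int)).1 = pureVal memo n ∧ InvA memo (auxFuel fuel m (n : Int)).2 := by
  intro n
  induction n using Nat.strong_induction_on with
  | _ n IH =>
    intro hreach m fuel hInv hlt hfuel
    match fuel, hfuel with
    | Nat.succ f, hfuel =>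
    simp only [auxFuel, PySem.List.pyGetD_natCast]
    by_cases hset : m.getD n 0 ≠ -1
    · rw [if_pos hset]
      exact ⟨invA_getD_set memo m hInv n hlt hset, hInv⟩
    · rw [not_not] at hset
      have hmemo : memo.getD n 0 = -1 := invA_unset memo m hInv n hlt hset
      have hn0 : n ≠ 0 := by
        intro h; subst h
        rw [hitsZero_zero, hmemo] at hreach
        simp at hreach
      obtain ⟨k, rfl⟩ : ∃ k, n = k + 1 := ⟨n - 1, by omega⟩
      rw [hitsZero_succ, hmemo] at hreach
      simp only [BEq.rfl, Bool.true_and, Bool.or_eq_false_iff] at hreach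
      obtain ⟨⟨hr2, hr3⟩, hr4⟩ := hreach
      simp only [hset, ne_eq, not_true_eq_false, if_false]
      have c2 : PySem.Int.floordiv ((k+1 : Nat) : Int) 2 = (((k+1)/2 : Nat) : Int) := by
        exact_mod_cast PySem.Int.floordiv_natCast (k+1) 2
      have c3 : PySem.Int.floordiv ((k+1 : Nat) : Int) 3 = (((k+1)/3 : Nat) : Int) := by
        exact_mod_cast PySem.Int.floordiv_natCast (k+1) 3
      have c4 : PySem.Int.floordiv ((k+1 : Nat) : Int) 4 = (((k+1)/4 : Nat) : Int) := by
        exact_mod_cast PySem.Int.floordiv_natCast (k+1) 4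
      rw [c2, c3, c4]
      obtain ⟨r2, i2⟩ := IH ((k+1)/2) (by omega) hr2 m f hInv (by omega) (by omega)
      obtain ⟨r3, i3⟩ := IH ((k+1)/3) (by omega) hr3 _ f i2 (by omega) (by omega)
      obtain ⟨r4, i4⟩ := IH ((k+1)/4) (by omega) hr4 _ f i3 (by omega) (by omega)
      rw [r2, r3, r4]
      set v := max (max ((((k+1)/2 : Nat) : Int) + (((k+1)/3 : Nat) : Int) + (((k+1)/4 : Nat) : Int))
        (pureVal memo ((k+1)/2) + pureVal memo ((k+1)/3) + pureVal memo ((k+1)/4))) (((k+1) : Nat) : Int) with hv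
      have hvpure : v = pureVal memo (k+1) := by
        rw [pureVal, if_neg (not_not_intro hmemo)]
      constructor
      · simpa using hvpure
      · simp only [PySem.List.pySetD_natCast]
        set m4 := (auxFuel f (auxFuel f (auxFuel f m (((k+1)/2 : Nat) : Int)).2 (((k+1)/3 : Nat) : Int)).2 (((k+1)/4 : Nat) : Int)).2
        refine ⟨by rw [List.length_set]; exact i4.1, fun j hj => ?_⟩
        rw [getD_set_eq_ite]
        by_cases hjn : j = k + 1 ∧ k + 1 < m4.length
        · rw [if_pos hjn]
          exact Or.inr ⟨hjn.1 ▸ hmemo, by rw [hjn.1, hvpure]⟩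
        · rw [if_neg hjn]
          exact i4.2 j hj

-- B's loop invariant: after processing states 0..s-1, vals holds the original entries where
-- set and the pure values below s where unset
def InvB (memo : List Int) (s : Nat) (vals : List Int) : Prop :=
  vals.length = memo.length ∧
  ∀ j : Nat, j < memo.length →
    vals.getD j 0 = if memo.getD j 0 ≠ -1 then memo.getD j 0
                    else if j < s then pureVal memo j else -1

theorem invB_getD_lt (memo : List Int) (s : Nat) (vals : List Int) (hInv : InvB memo s vals)
    (c : Nat) (hcs : c < s) (hc : c < memo.length) : vals.getD c 0 = pureVal memo c := by
  rw [hInv.2 c hc]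
  by_cases h1 : memo.getD c 0 ≠ -1
  · rw [if_pos h1, pureVal_of_set memo c h1]
  · rw [if_neg h1, if_pos hcs]

theorem fillStep_invB (memo : List Int) (s : Nat) (vals : List Int) (hs : s < memo.length)
    (hInv : InvB memo s vals) : InvB memo (s + 1) (fillStep vals (s : Int)) := by
  obtain ⟨hlen, hval⟩ := hInv
  have hvs : vals.getD s 0 = if memo.getD s 0 ≠ -1 then memo.getD s 0 else -1 := by
    rw [hval s hs]
    by_cases h1 : memo.getD s 0 ≠ -1
    · rw [if_pos h1, if_pos h1]
    · rw [if_neg h1, if_neg h1, if_neg (by omega : ¬ s < s)]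
  have c2 : PySem.Int.floordiv (s : Int) 2 = ((s/2 : Nat) : Int) := by
    exact_mod_cast PySem.Int.floordiv_natCast s 2
  have c3 : PySem.Int.floordiv (s : Int) 3 = ((s/3 : Nat) : Int) := by
    exact_mod_cast PySem.Int.floordiv_natCast s 3
  have c4 : PySem.Int.floordiv (s : Int) 4 = ((s/4 : Nat) : Int) := by
    exact_mod_cast PySem.Int.floordiv_natCast s 4
  unfold fillStep
  rw [c2, c3, c4]
  simp only [PySem.List.pyGetD_natCast]
  by_cases hset : memo.getD s 0 ≠ -1
  · rw [if_neg (by rw [hvs, if_pos hset]; exact hset)]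
    refine ⟨hlen, fun j hj => ?_⟩
    rw [hval j hj]
    by_cases h1 : memo.getD j 0 ≠ -1
    · rw [if_pos h1, if_pos h1]
    · have hjs : j ≠ s := fun h => hset (h ▸ not_not.mp h1)
      rw [if_neg h1, if_neg h1]
      simp only [show (j < s + 1) ↔ j < s from by omega]
  · rw [not_not] at hset
    have hvs' : vals.getD s 0 = -1 := by rw [hvs, if_neg (not_not_intro hset)]
    rw [if_pos hvs']
    have hchild : ∀ c : Nat, c < s → vals.getD c 0 = pureVal memo c := fun c hcs =>
      invB_getD_lt memo s vals ⟨hlen, hval⟩ c hcs (lt_trans hcs hs)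
    have hv : max (max (((s/2 : Nat) : Int) + ((s/3 : Nat) : Int) + ((s/4 : Nat) : Int))
        (vals.getD (s/2) 0 + vals.getD (s/3) 0 + vals.getD (s/4) 0)) (s : Int)
        = pureVal memo s := by
      cases s with
      | zero =>
        rw [pureVal, if_neg (not_not_intro hset)]
        simp only [List.getD] at hvs'
        norm_num [hvs']
      | succ t =>
        rw [hchild _ (by omega), hchild _ (by omega), hchild _ (by omega),
          pureVal, if_neg (not_not_intro hset)]
    rw [hv]
    simp only [PySem.List.pySetD_natCast]
    refine ⟨by rw [List.length_set]; exact hlen, fun j hj => ?_⟩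
    rw [getD_set_eq_ite]
    by_cases hjs : j = s
    · rw [if_pos ⟨hjs, by omega⟩, hjs]
      simp only [hset, ne_eq, not_true_eq_false, if_false, if_pos (by omega : s < s + 1)]
    · rw [if_neg (by tauto), hval j hj]
      by_cases h1 : memo.getD j 0 ≠ -1
      · rw [if_pos h1, if_pos h1]
      · rw [if_neg h1, if_neg h1]
        simp only [show (j < s + 1) ↔ j < s from by omega]

theorem fill_correct (memo : List Int) :
    ∀ s : Nat, s ≤ memo.length →
      InvB memo s ((PySem.List.pyRange 0 (s : Int) 1).foldl fillStep memo) := by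
  intro s
  induction s with
  | zero =>
    intro _
    rw [show ((0:Nat) : Int) = 0 from rfl, PySem.List.pyRange_one_eq_nil (by omega), List.foldl_nil]
    refine ⟨rfl, fun j hj => ?_⟩
    by_cases h1 : memo.getD j 0 ≠ -1
    · rw [if_pos h1]
    · rw [if_neg h1, if_neg (by omega : ¬ j < 0)]
      exact not_not.mp h1
  | succ t IH =>
    intro hle
    have := IH (by omega)
    rw [show ((t+1 : Nat) : Int) = (t : Int) + 1 from by push_cast; ring,
      PySem.List.pyRange_one_succ_right (a := 0) (b := (t : Int)) (by omega), List.foldl_append]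
    simp only [List.foldl_cons, List.foldl_nil]
    exact fillStep_invB memo t _ (by omega) this

-- ===== VERDICT (by name: the statement is the Claim_ definition above) =====
theorem aux_spec : Claim_equal_aux := by
  intro memo i _ hpre
  rcases hpre with ⟨hi0, hilen, hreach⟩ | ⟨hlo, hneg, hset⟩
  case inr =>
    -- negative in-range i with memo[i] set: both programs return memo[i] at once
    have ht : i.toNat = 0 := by omega
    show aux memo i = aux_alt memo i
    simp only [aux, aux_alt, ht]
    rw [show (0 + 2 : Nat) = Nat.succ 1 from rfl]
    simp only [auxFuel, if_pos hset]
  obtain ⟨n, rfl⟩ : ∃ n : Nat, i = (n : Int) := ⟨i.toNat, (Int.toNat_of_nonneg hi0).symm⟩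
  have hn : n < memo.length := by exact_mod_cast hilen
  simp only [Int.toNat_natCast] at hreach
  show aux memo (n : Int) = aux_alt memo (n : Int)
  simp only [aux, aux_alt, Int.toNat_natCast, PySem.List.pyGetD_natCast]
  by_cases h1 : memo.getD n 0 ≠ -1
  · rw [if_pos h1]
    rw [show n + 2 = Nat.succ (n + 1) from rfl]
    simp only [auxFuel, PySem.List.pyGetD_natCast]
    rw [if_pos h1]
  · have h2 : memo.getD n 0 = -1 := not_not.mp h1
    rw [if_neg h1]
    have hA := auxFuel_correct memo n hreach memo (n + 2)
      ⟨rfl, fun j _ => Or.inl rfl⟩ hn (by omega)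
    rw [hA.1]
    have hB := fill_correct memo (n + 1) (by omega)
    rw [show (n : Int) + 1 = ((n + 1 : Nat) : Int) from by push_cast; ring]
    rw [hB.2 n hn, if_neg (not_not_intro h2), if_pos (by omega : n < n + 1)]
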